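-- pv_equiv track=rewrite | github.com/doctena-org/octorules-aws | octorules_aws/_acl_settings.py | normalize_acl_settings
-- ===== SOURCE A (Python) =====
-- _MANAGED_FIELDS = frozenset(
--     {
--         "DefaultAction",
--         "VisibilityConfig",
--         "ChallengeConfig",
--         "CaptchaConfig",
--         "TokenDomains",
--         "AssociationConfig",
--         "CustomResponseBodies",
--     }
-- )
--
-- def normalize_acl_settings(acl: dict) -> dict:
--     """Extract managed settings from a Web ACL dict.
--
--     Passes through raw AWS PascalCase structure since octorules-aws uses
--     AWS-native field names throughout.
--     """
--     if not acl:
--         return {}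
--
--     result: dict = {}
--     for key in sorted(_MANAGED_FIELDS):
--         val = acl.get(key)
--         if val is not None:
--             result[key] = val
--     return result
-- ===== SOURCE B (Python) =====
-- _MANAGED_FIELDS = frozenset(
--     {
--         "DefaultAction",
--         "VisibilityConfig",
--         "ChallengeConfig",
--         "CaptchaConfig",
--         "TokenDomains",
--         "AssociationConfig",
--         "CustomResponseBodies",
--     }
-- )
--
--
-- def normalize_acl_settings(acl: dict) -> dict:
--     """Extract managed settings from a Web ACL dict.
--
--     Single pass over the input: keep the managed items, then order them by key.
--     """
--     if not acl:
--         return {}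
--     managed = [(k, v) for k, v in acl.items() if k in _MANAGED_FIELDS]
--     return dict(sorted(managed, key=lambda kv: kv[0]))
-- ===== Notes on version B (the rewrite author's own statement) =====
-- stated objective: idiomatic
-- what changed: A probes each of the seven sorted managed field names with a dict lookup; B makes one filtering pass over the input's items keeping the managed ones and then sorts them by key, so iteration is driven by the input rather than by the constant field set.
import Mathlib
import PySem

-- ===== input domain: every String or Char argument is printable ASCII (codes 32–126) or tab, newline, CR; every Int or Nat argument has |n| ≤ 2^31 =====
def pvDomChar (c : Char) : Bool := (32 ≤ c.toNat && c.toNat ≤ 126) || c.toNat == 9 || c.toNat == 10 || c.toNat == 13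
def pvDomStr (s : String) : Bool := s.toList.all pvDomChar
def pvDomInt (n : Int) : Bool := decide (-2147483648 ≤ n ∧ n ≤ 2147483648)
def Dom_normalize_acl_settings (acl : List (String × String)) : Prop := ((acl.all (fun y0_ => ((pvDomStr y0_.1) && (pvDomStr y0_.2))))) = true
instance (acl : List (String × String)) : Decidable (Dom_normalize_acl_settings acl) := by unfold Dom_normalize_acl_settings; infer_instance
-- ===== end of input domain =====

-- B replaces A's loop over the seven sorted managed field names (one dict lookup each)
-- by a single filtering pass over the input's items followed by a sort by key (idiomatic).


-- ===== PORT A =====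
-- _MANAGED_FIELDS (module constant, a frozenset)
def pvManagedFields : PySem.Set String :=
  PySem.Set.ofList ["DefaultAction", "VisibilityConfig", "ChallengeConfig", "CaptchaConfig",
                    "TokenDomains", "AssociationConfig", "CustomResponseBodies"]

def normalize_acl_settings (acl : List (String × String)) : List (String × String) :=
  if acl = [] then []
  else
    -- for key in sorted(_MANAGED_FIELDS): val = acl.get(key); if val is not None: result[key] = val
    (PySem.List.sorted pvManagedFields (fun k => k) false).foldl
      (fun result key =>
        match (PySem.Dict.mk acl).get? key with
        | some v => result ++ [(key, v)]
        | none => result) []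

-- ===== PORT B =====
def normalize_acl_settings_alt (acl : List (String × String)) : List (String × String) :=
  if acl = [] then []
  else
    PySem.List.sorted (acl.filter (fun kv => PySem.Set.contains pvManagedFields kv.1))
      (fun kv => kv.1) false

-- ===== PRECONDITION & SPEC =====
-- Pre_ excludes association lists with duplicate keys: they do not arise from a Python dict
-- (A's parameter type), and there A's first-match .get and B's keep-all filter would both be
-- accidental readings of an input that has no dict meaning.
def Pre_normalize_acl_settings (acl : List (String × String)) : Prop :=
  (acl.map Prod.fst).Nodup
instance (acl : List (String × String)) : Decidable (Pre_normalize_acl_settings acl) := by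
  unfold Pre_normalize_acl_settings; infer_instance

def pvWitness_normalize_acl_settings : (List (String × String)) :=
  [("DefaultAction", "Allow"), ("Name", "acl1"), ("CaptchaConfig", "cc")]

def Spec_normalize_acl_settings (acl : List (String × String)) (out : List (String × String)) : Prop := out = normalize_acl_settings_alt acl
instance (acl : List (String × String)) (out : List (String × String)) : Decidable (Spec_normalize_acl_settings acl out) := by unfold Spec_normalize_acl_settings; infer_instance

-- ===== CLAIM (what is proved, stated in full; the proofs are below) =====
def Claim_equal_normalize_acl_settings : Prop := ∀ (acl : List (String × String)), Dom_normalize_acl_settings acl → Pre_normalize_acl_settings acl → Spec_normalize_acl_settings acl (normalize_acl_settings acl)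

-- ===== LEMMAS AND PROOFS =====

-- A's loop over the sorted field names is a filterMap over them.
theorem pvFoldl_eq_filterMap (d : PySem.Dict String String) (ks : List String)
    (init : List (String × String)) :
    ks.foldl
      (fun result key =>
        match d.get? key with
        | some v => result ++ [(key, v)]
        | none => result) init
      = init ++ ks.filterMap (fun k => (d.get? k).map (fun v => (k, v))) := by
  induction ks generalizing init with
  | nil => simp
  | cons k ks ih =>
    cases h : d.get? k <;> simp [List.foldl_cons, h, ih]

-- keys of the filterMap are strictly increasing when the scanned list is.
theorem pvFilterMap_pairwise (d : PySem.Dict String String) (S : List String)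
    (hS : S.Pairwise (· < ·)) :
    (S.filterMap (fun k => (d.get? k).map (fun v => (k, v)))).Pairwise
      (fun a b => a.1 < b.1) := by
  induction S with
  | nil => simp
  | cons k S ih =>
    rcases List.pairwise_cons.mp hS with ⟨hk, hS'⟩
    cases h : d.get? k with
    | none => simpa [h] using ih hS'
    | some v =>
      rw [List.filterMap_cons]
      simp only [h, Option.map_some]
      refine List.pairwise_cons.mpr ⟨?_, ih hS'⟩
      intro b hb
      rcases List.mem_filterMap.mp hb with ⟨k', hk', hg⟩
      rcases Option.map_eq_some_iff.mp hg with ⟨v', _, hb'⟩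
      have : b.1 = k' := by rw [← hb']
      simpa [this] using hk k' hk'

-- membership in the filterMap
theorem pvMem_filterMap (d : PySem.Dict String String) (S : List String)
    (x : String × String) :
    x ∈ S.filterMap (fun k => (d.get? k).map (fun v => (k, v))) ↔
      x.1 ∈ S ∧ d.get? x.1 = some x.2 := by
  constructor
  · intro hx
    rcases List.mem_filterMap.mp hx with ⟨k, hk, hg⟩
    rcases Option.map_eq_some_iff.mp hg with ⟨v, hv, hx'⟩
    cases hx'
    exact ⟨hk, hv⟩
  · intro ⟨h1, h2⟩
    exact List.mem_filterMap.mpr ⟨x.1, h1, by simp [h2]⟩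

-- ===== VERDICT (by name: the statement is the Claim_ definition above) =====
theorem normalize_acl_settings_spec : Claim_equal_normalize_acl_settings := by
  intro acl _ hpre
  unfold Spec_normalize_acl_settings
  unfold Pre_normalize_acl_settings at hpre
  by_cases hnil : acl = []
  · simp [normalize_acl_settings, normalize_acl_settings_alt, hnil]
  · unfold normalize_acl_settings normalize_acl_settings_alt
    rw [if_neg hnil, if_neg hnil]
    set d : PySem.Dict String String := PySem.Dict.mk acl with hd
    set S : List String := PySem.List.sorted pvManagedFields (fun k => k) false with hS
    rw [pvFoldl_eq_filterMap d S, List.nil_append]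
    have hkeys : d.keys = acl.map Prod.fst := by
      simp [hd, PySem.Dict.keys]
    have hdnod : d.keys.Nodup := by rw [hkeys]; exact hpre
    have hitems : d.items = acl := rfl
    have hSp : S.Pairwise (· < ·) := by
      rw [hS]
      exact PySem.List.sorted_ofList_pairwise_lt
        ["DefaultAction", "VisibilityConfig", "ChallengeConfig", "CaptchaConfig",
         "TokenDomains", "AssociationConfig", "CustomResponseBodies"]
    symm
    apply PySem.List.sorted_eq_of_perm_of_pairwise_lt
    · -- permutation
      rw [List.perm_ext_iff_of_nodup]
      · intro x
        rw [pvMem_filterMap, List.mem_filter]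
        have hmemS : x.1 ∈ S ↔ PySem.Set.contains pvManagedFields x.1 = true := by
          rw [hS, PySem.List.mem_sorted, PySem.Set.contains_iff]
        have hget : d.get? x.1 = some x.2 ↔ x ∈ acl := by
          rw [PySem.Dict.get?_eq_some_iff_mem_items d x.1 x.2 hdnod, hitems]
        constructor
        · intro ⟨h1, h2⟩; exact ⟨hget.mp h2, by simpa using hmemS.mp h1⟩
        · intro ⟨h1, h2⟩; exact ⟨hmemS.mpr (by simpa using h2), hget.mpr h1⟩
      · -- filterMap nodup
        exact (pvFilterMap_pairwise d S hSp).imp (fun h => by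
          intro he; rw [he] at h; exact lt_irrefl _ h)
      · -- filter nodup
        exact ((hpre.of_map).filter _)
    · exact pvFilterMap_pairwise d S hSp
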